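-- pv_equiv track=rewrite | github.com/nationalarchives/ds-infrastructure-backup-services | applications/secure-backups/src/private_tools/helpers.py | create_upload_map
-- ===== SOURCE A (Python) =====
-- def create_upload_map(total_size: int, max_block_size: int=104857600):
--     upload_map = []
--     part_count = -(-total_size // max_block_size)
--     if part_count <= 1:
--         upload_map = [[0, (total_size - 1)]]
--     else:
--         part_size = -(-total_size // part_count)
--         to_transfer_total = total_size
--         for i in range(part_count):
--             if i > 0:
--                 if upload_map[i-1][2] < part_size:
--                     transfer_size = upload_map[i-1][2]
--                 else:
--                     transfer_size = part_size
--                 range_from = upload_map[i-1][1] + 1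
--                 range_to = range_from + transfer_size - 1
--                 to_transfer_total -= transfer_size
--             else:
--                 range_from = 0
--                 range_to = part_size - 1
--                 to_transfer_total = total_size - part_size
--             upload_map.append([range_from, range_to, to_transfer_total])
--     return upload_map
-- ===== SOURCE B (Python) =====
-- def create_upload_map(total_size: int, max_block_size: int = 104857600):
--     part_count = -(-total_size // max_block_size)
--     if part_count <= 1:
--         return [[0, total_size - 1]]
--     part_size = -(-total_size // part_count)
--     chunks = []
--     for start in range(0, total_size, part_size):
--         end = min(start + part_size, total_size)
--         chunks.append([start, end - 1, total_size - end])
--     return chunks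
-- ===== Notes on version B (the rewrite author's own statement) =====
-- stated objective: simpler
-- what changed: B drops A's read-back from the previously appended entry and the i==0/i>0 branching: it iterates start offsets with range(0, total_size, part_size) and computes each chunk [start, min(start+part_size,total_size)-1, remaining] directly from the offset; Pre_ excludes max_block_size=0 (ZeroDivisionError) and the meaningless both-negative-size inputs, the only ones reaching the loop with negative sizes, where A's read-back yields accidental garbage ranges.
import Mathlib
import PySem

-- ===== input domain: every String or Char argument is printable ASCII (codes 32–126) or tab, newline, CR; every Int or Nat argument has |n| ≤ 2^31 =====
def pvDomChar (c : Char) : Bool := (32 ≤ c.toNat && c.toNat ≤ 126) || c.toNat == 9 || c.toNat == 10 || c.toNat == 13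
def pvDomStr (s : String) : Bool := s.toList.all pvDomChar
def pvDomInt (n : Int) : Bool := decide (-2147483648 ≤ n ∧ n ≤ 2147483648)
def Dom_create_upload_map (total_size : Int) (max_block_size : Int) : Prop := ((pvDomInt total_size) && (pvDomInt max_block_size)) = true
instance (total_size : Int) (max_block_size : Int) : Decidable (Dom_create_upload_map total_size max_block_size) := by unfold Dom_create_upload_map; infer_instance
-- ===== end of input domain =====

-- B replaces A's read-back-from-the-previous-entry loop by one pass over range(0, total_size, part_size),
-- each chunk computed directly from its start offset (objective: simpler).
-- Equivalence is about the RETURN value; neither program mutates its arguments.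

-- ===== PORT A =====
-- one loop iteration of A: state = (upload_map, to_transfer_total), i = loop index
def aStep (total_size : Int) (part_size : Int)
    (st : List (List Int) × Int) (i : Int) : List (List Int) × Int :=
  if i > 0 then
    let prev := PySem.List.pyGetD st.1 (i - 1) []
    let prev2 := PySem.List.pyGetD prev 2 0
    let transfer_size := if prev2 < part_size then prev2 else part_size
    let range_from := PySem.List.pyGetD prev 1 0 + 1
    let range_to := range_from + transfer_size - 1
    let ttt := st.2 - transfer_size
    (st.1 ++ [[range_from, range_to, ttt]], ttt)
  else
    let range_from : Int := 0
    let range_to := part_size - 1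
    let ttt := total_size - part_size
    (st.1 ++ [[range_from, range_to, ttt]], ttt)

def create_upload_map (total_size : Int) (max_block_size : Int) : List (List Int) :=
  let part_count := -(PySem.Int.floordiv (-total_size) max_block_size)
  if part_count ≤ 1 then
    [[0, total_size - 1]]
  else
    let part_size := -(PySem.Int.floordiv (-total_size) part_count)
    ((PySem.List.pyRange 0 part_count 1).foldl (aStep total_size part_size) ([], total_size)).1

-- ===== PORT B =====
def create_upload_map_alt (total_size : Int) (max_block_size : Int) : List (List Int) :=
  let part_count := -(PySem.Int.floordiv (-total_size) max_block_size)
  if part_count ≤ 1 then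
    [[0, total_size - 1]]
  else
    let part_size := -(PySem.Int.floordiv (-total_size) part_count)
    (PySem.List.pyRange 0 total_size part_size).map (fun start =>
      let e := min (start + part_size) total_size
      [start, e - 1, total_size - e])

-- ===== PRECONDITION & SPEC =====
-- Pre_ excludes max_block_size = 0, where A raises ZeroDivisionError, and the meaningless inputs with
-- both total_size and max_block_size negative, the only ones reaching A's loop with negative sizes,
-- where A's read-back of leftover loop state produces accidental garbage ranges.
def Pre_create_upload_map (total_size : Int) (max_block_size : Int) : Prop :=
  max_block_size ≠ 0 ∧ ¬(total_size < 0 ∧ max_block_size < 0)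
instance (total_size : Int) (max_block_size : Int) : Decidable (Pre_create_upload_map total_size max_block_size) := by
  unfold Pre_create_upload_map; infer_instance

def pvWitness_create_upload_map : Int × Int := (10, 3)

def Spec_create_upload_map (total_size : Int) (max_block_size : Int) (out : List (List Int)) : Prop :=
  out = create_upload_map_alt total_size max_block_size
instance (total_size : Int) (max_block_size : Int) (out : List (List Int)) : Decidable (Spec_create_upload_map total_size max_block_size out) := by
  unfold Spec_create_upload_map; infer_instance

-- ===== CLAIM (what is proved, stated in full; the proofs are below) =====
def Claim_equal_create_upload_map : Prop := ∀ (total_size : Int) (max_block_size : Int), Dom_create_upload_map total_size max_block_size → Pre_create_upload_map total_size max_block_size → Spec_create_upload_map total_size max_block_size (create_upload_map total_size max_block_size)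

-- ===== LEMMAS AND PROOFS =====

-- closed form of the i-th chunk (for the part_count >= 2 branch)
def chunkN (t ps : Int) (k : Nat) : List Int :=
  [(k : Int) * ps, min (((k : Int) + 1) * ps) t - 1, t - min (((k : Int) + 1) * ps) t]

-- A's loop over the first j indices builds exactly the first j closed-form chunks
lemma aLoop_closed (t ps pc : Int) (hps : 1 ≤ ps) (hpc : 2 ≤ pc)
    (hlt : (pc - 1) * ps < t) :
    ∀ j : Nat, 1 ≤ j → (j : Int) ≤ pc →
      (PySem.List.pyRange 0 (j : Int) 1).foldl (aStep t ps) ([], t)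
        = ((List.range j).map (chunkN t ps), t - min ((j : Int) * ps) t) := by
  intro j
  induction j with
  | zero => intro h; omega
  | succ n ih =>
    intro _ hle
    rcases Nat.eq_zero_or_pos n with hn | hn
    · subst hn
      have h1 : PySem.List.pyRange 0 (1 : Int) 1 = [0] := by decide
      have hpst : ps < t := by nlinarith
      simp [h1, aStep, chunkN, List.range_succ]
      omega
    · have hcast : ((n + 1 : Nat) : Int) = (n : Int) + 1 := by push_cast; ring
      have hrange : PySem.List.pyRange 0 ((n + 1 : Nat) : Int) 1
          = PySem.List.pyRange 0 (n : Int) 1 ++ [(n : Int)] := by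
        rw [hcast, PySem.List.pyRange_one_succ_right (by positivity)]
      have ihr := ih hn (by omega)
      rw [hrange, List.foldl_append, ihr]
      have hnpc : (n : Int) ≤ pc - 1 := by omega
      have hnlt : (n : Int) * ps < t := by nlinarith
      have hmin : min ((n : Int) * ps) t = (n : Int) * ps := by omega
      have hprev : PySem.List.pyGetD ((List.range n).map (chunkN t ps)) ((n : Int) - 1) []
          = chunkN t ps (n - 1) := by
        have h1 : ((n : Int) - 1) = ((n - 1 : Nat) : Int) := by omega
        rw [h1, PySem.List.pyGetD_natCast, List.getD_eq_getElem?_getD]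
        simp [List.getElem?_map, List.getElem?_range (show n - 1 < n by omega)]
      have hc1 : ((n - 1 : Nat) : Int) = (n : Int) - 1 := by omega
      have hc2 : ((n : Int) - 1) * ps = (n : Int) * ps - ps := by ring
      have hc3 : ((n : Int) - 1 + 1) * ps = (n : Int) * ps := by ring
      have hc4 : ((n : Int) + 1) * ps = (n : Int) * ps + ps := by ring
      have hstep : aStep t ps ((List.range n).map (chunkN t ps), t - min ((n : Int) * ps) t) ((n : Int))
          = ((List.range n).map (chunkN t ps) ++ [chunkN t ps n], t - min (((n : Int) + 1) * ps) t) := by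
        rw [aStep, if_pos (by exact_mod_cast hn)]
        rw [hprev]
        simp only [chunkN, hc1, hc2, hc3, hc4, hmin,
          PySem.List.pyGetD_ofNat', List.getD, List.getElem?_cons_zero,
          List.getElem?_cons_succ, Option.getD_some]
        generalize (n : Int) * ps = A at hnlt ⊢
        have hif : (if t - A < ps then t - A else ps) = min (t - A) ps := by
          split_ifs <;> omega
        rw [hif]
        simp only [Prod.mk.injEq, List.append_right_inj, List.cons.injEq, and_true]
        omega
      rw [List.foldl_cons, List.foldl_nil, hstep, hcast, List.range_succ, List.map_append]
      simp

-- ceiling-division facts packaged for the main proof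
lemma pc_spec {t M pc : Int} (hM : 0 < M)
    (h : pc = -(PySem.Int.floordiv (-t) M)) : (pc - 1) * M < t ∧ t ≤ pc * M := by
  exact (PySem.Int.neg_floordiv_neg_eq_iff_of_pos hM).1 h.symm

-- when total_size ≤ 0 or max_block_size < 0 (not both negative), part_count ≤ 1
lemma pc_le_one_of_nonpos {t M pc : Int} (hM : M ≠ 0) (hnot : ¬(t < 0 ∧ M < 0))
    (ht : t ≤ 0 ∨ M < 0) (h : pc = -(PySem.Int.floordiv (-t) M)) : pc ≤ 1 := by
  rcases lt_or_gt_of_ne hM with hMneg | hMpos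
  · -- M < 0, hence t ≥ 0, hence -t ≤ 0 and floordiv (-t) M ≥ 0
    have ht0 : 0 ≤ t := by omega
    have hb := PySem.Int.mod_neg_bounds (a := -t) hMneg
    have hd := PySem.Int.floordiv_mul_add_mod (-t) M
    set fd := PySem.Int.floordiv (-t) M with hfd
    have : 0 ≤ fd := by
      by_cases h : 0 ≤ fd
      · exact h
      have h1 : (0:Int) ≤ (-(fd + 1)) * (-M) := mul_nonneg (by omega) (by omega)
      nlinarith
    omega
  · -- M > 0 and t ≤ 0
    have ht0 : t ≤ 0 := by omega
    have := pc_spec hMpos h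
    nlinarith

-- ===== VERDICT (by name: the statement is the Claim_ definition above) =====
theorem create_upload_map_spec : Claim_equal_create_upload_map := by
  intro t M _ hpre
  obtain ⟨hM0, hnot⟩ := hpre
  unfold Spec_create_upload_map create_upload_map create_upload_map_alt
  set pc := -(PySem.Int.floordiv (-t) M) with hpc
  by_cases hle : pc ≤ 1
  · simp [hle]
  · rw [if_neg hle, if_neg hle]
    simp only []
    have hpc2 : 2 ≤ pc := by omega
    -- part_count ≥ 2 forces t > 0 and M > 0
    have hMpos : 0 < M := by
      by_contra hc
      exact hle (pc_le_one_of_nonpos hM0 hnot (by omega) hpc)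
    have htpos : 0 < t := by
      by_contra hc
      exact hle (pc_le_one_of_nonpos hM0 hnot (by omega) hpc)
    obtain ⟨hMlt, hMle⟩ := pc_spec hMpos hpc
    set ps := -(PySem.Int.floordiv (-t) pc) with hps
    obtain ⟨hplt, hple⟩ := pc_spec (by omega : (0:Int) < pc) hps
    have hps1 : 1 ≤ ps := by nlinarith
    have hpsM : ps ≤ M := by nlinarith
    have hlt : (pc - 1) * ps < t := by nlinarith
    -- A's side: the loop equals the closed-form chunks
    have hcastpc : ((pc.toNat : Nat) : Int) = pc := by omega
    have hA := aLoop_closed t ps pc hps1 hpc2 hlt pc.toNat (by omega) (by omega)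
    rw [hcastpc] at hA
    rw [hA]
    -- B's side: range(0, t, ps) enumerated
    rw [PySem.List.pyRange_of_pos 0 t (by omega : (0:Int) < ps)]
    rw [if_pos (by omega : (0:Int) < t)]
    have hcount : ((t - 0 + ps - 1) / ps) = pc := by
      rw [← PySem.Int.floordiv_eq_ediv_of_pos (by omega : (0:Int) < ps)]
      rw [PySem.Int.floordiv_eq_iff_of_pos (by omega : (0:Int) < ps)]
      constructor <;> nlinarith
    rw [hcount, List.map_map]
    apply List.map_congr_left
    intro k _
    simp only [Function.comp_apply, chunkN]
    have h1 : (0 : Int) + ps * (k : Int) = (k : Int) * ps := by ring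
    have h2 : (k : Int) * ps + ps = ((k : Int) + 1) * ps := by ring
    rw [h1, h2]
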